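-- pv_equiv track=rewrite | github.com/AngelFireLA/GameLauncher-L1ST | tours_hannoi/interface/partie_en_cours.py | poteau_proche
-- ===== SOURCE A (Python) =====
-- positions_poteaux = {0: 150, 1:500, 2:850}
--
-- def poteau_proche(x):
--     proche = None
--     max_distance = float("inf")
--     for i in range(3):
--         distance = abs(positions_poteaux[i]-x)
--         if distance < max_distance:
--             max_distance = distance
--             proche = i
--     return proche
-- ===== SOURCE B (Python) =====
-- positions_poteaux = {0: 150, 1: 500, 2: 850}
--
-- def poteau_proche(x):
--     # closed-form interval test: midpoints between adjacent poles; <= keeps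
--     # the lower index on an exact tie, matching the strict-< minimum loop
--     m01 = (positions_poteaux[0] + positions_poteaux[1]) // 2  # 325
--     m12 = (positions_poteaux[1] + positions_poteaux[2]) // 2  # 675
--     return 0 if x <= m01 else (1 if x <= m12 else 2)
-- ===== Notes on version B (the rewrite author's own statement) =====
-- stated objective: simpler
-- what changed: Replaces the min-distance loop over the pole dict with a closed-form interval test against the two midpoints between adjacent poles (<= keeps the loop's lower-index tie-break).
import Mathlib
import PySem

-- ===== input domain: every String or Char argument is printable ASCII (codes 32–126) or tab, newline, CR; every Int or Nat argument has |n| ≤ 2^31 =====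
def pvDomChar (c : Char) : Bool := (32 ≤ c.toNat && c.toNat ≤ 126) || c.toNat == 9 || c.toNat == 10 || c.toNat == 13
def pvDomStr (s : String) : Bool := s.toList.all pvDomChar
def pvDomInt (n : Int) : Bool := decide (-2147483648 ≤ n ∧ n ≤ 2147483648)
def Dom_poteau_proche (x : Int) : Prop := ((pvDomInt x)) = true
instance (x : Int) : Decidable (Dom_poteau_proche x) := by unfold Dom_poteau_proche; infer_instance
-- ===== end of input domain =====

-- B replaces the 3-iteration min-distance loop with a closed-form midpoint interval test (simpler).


-- ===== PORT A =====
def positions_poteaux : PySem.Dict Int Int :=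
  (((PySem.Dict.empty).insert 0 150).insert 1 500).insert 2 850

-- state: (proche, max_distance); None for max_distance models float("inf"),
-- None for proche models the initial None. The loop always runs, so proche is
-- always assigned; .getD 0 only discharges the unreachable None case.
def poteau_proche (x : Int) : Int :=
  let r := (PySem.List.pyRange 0 3 1).foldl
    (fun (st : Option Int × Option Nat) i =>
      -- positions_poteaux[i] always hits (keys 0,1,2); get?.getD 0 is exact here
      let distance := ((PySem.Dict.get? positions_poteaux i).getD 0 - x).natAbs
      match st.2 with
      | none => (some i, some distance)
      | some m => if distance < m then (some i, some distance) else st)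
    (none, none)
  r.1.getD 0

-- ===== PORT B =====
def poteau_proche_alt (x : Int) : Int :=
  let m01 := PySem.Int.floordiv ((PySem.Dict.get? positions_poteaux 0).getD 0 + (PySem.Dict.get? positions_poteaux 1).getD 0) 2
  let m12 := PySem.Int.floordiv ((PySem.Dict.get? positions_poteaux 1).getD 0 + (PySem.Dict.get? positions_poteaux 2).getD 0) 2
  if x ≤ m01 then 0 else if x ≤ m12 then 1 else 2

-- ===== PRECONDITION & SPEC =====
def Spec_poteau_proche (x : Int) (out : Int) : Prop := out = poteau_proche_alt x
instance (x : Int) (out : Int) : Decidable (Spec_poteau_proche x out) := by unfold Spec_poteau_proche; infer_instance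

-- ===== CLAIM (what is proved, stated in full; the proofs are below) =====
def Claim_equal_poteau_proche : Prop := ∀ (x : Int), Dom_poteau_proche x → Spec_poteau_proche x (poteau_proche x)

-- ===== LEMMAS AND PROOFS =====

-- ===== VERDICT (by name: the statement is the Claim_ definition above) =====
theorem poteau_proche_spec : Claim_equal_poteau_proche := by
  intro x _
  show poteau_proche x = poteau_proche_alt x
  simp [poteau_proche, poteau_proche_alt, positions_poteaux,
    PySem.List.pyRange, PySem.Dict.get?, PySem.Dict.insert, PySem.Dict.empty,
    PySem.Int.floordiv, List.range_succ]
  split_ifs <;> simp_all <;> (try split_ifs <;> simp_all) <;> omega
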